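-- pv_equiv track=rewrite | github.com/Minuteandone/MSM-Aniviewer | aniviewer/Resources/bin2json/dof_anim_to_json.py | _extract_node_mappings
-- ===== SOURCE A (Python) =====
-- from typing import Any, Callable, Dict, Iterable, List, Optional, Tuple
--
-- def _extract_node_mappings(raw_text: str) -> List[str]:
--     mappings: List[str] = []
--     node_index = -1
--     for line in raw_text.splitlines():
--         stripped = line.lstrip()
--         if stripped.startswith("- NodeType:"):
--             node_index += 1
--             mappings.append("")
--             continue
--         if stripped.startswith("ImageIndexLocal2Global:"):
--             value = stripped.split(":", 1)[1].strip()
--             if node_index >= 0 and node_index < len(mappings):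
--                 mappings[node_index] = value
--     return mappings
-- ===== SOURCE B (Python) =====
-- def _last_value(body):
--     value = ""
--     for s in body:
--         if s.startswith("ImageIndexLocal2Global:"):
--             value = s.split(":", 1)[1].strip()
--     return value
--
--
-- def _extract_node_mappings(raw_text):
--     sections = []
--     current = None
--     for line in raw_text.splitlines():
--         s = line.lstrip()
--         if s.startswith("- NodeType:"):
--             current = []
--             sections.append(current)
--         elif current is not None:
--             current.append(s)
--     return [_last_value(body) for body in sections]
-- ===== Notes on version B (the rewrite author's own statement) =====
-- stated objective: alternative
-- what changed: A is a single stateful pass tracking a numeric index into the growing result and mutating it in place; B first partitions the lstripped lines into per-NodeType sections (a list of line lists, preamble dropped) and then maps a separate last-ImageIndexLocal2Global reducer over the sections.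
import Mathlib
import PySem

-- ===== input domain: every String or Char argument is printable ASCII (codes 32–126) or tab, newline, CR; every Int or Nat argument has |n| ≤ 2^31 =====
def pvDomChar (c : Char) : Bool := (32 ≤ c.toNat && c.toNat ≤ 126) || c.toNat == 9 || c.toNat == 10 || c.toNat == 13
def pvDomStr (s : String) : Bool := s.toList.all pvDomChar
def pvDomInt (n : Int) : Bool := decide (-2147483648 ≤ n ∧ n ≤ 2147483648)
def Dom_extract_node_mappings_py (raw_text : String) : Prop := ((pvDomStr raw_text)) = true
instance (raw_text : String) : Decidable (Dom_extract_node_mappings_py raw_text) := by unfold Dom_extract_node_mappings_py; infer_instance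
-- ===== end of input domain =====

-- B replaces A's index-tracking single pass by a partition-into-sections phase plus a map of a
-- last-value reducer; same return value, no speed claim.

-- ===== PORT A =====
-- stripped.split(":", 1)[1].strip(); at every use site stripped contains ':', so index 1 exists
-- and pyGetD's default "" is never used.
def pvVal (s : String) : String :=
  PySem.Str.strip (PySem.List.pyGetD ((PySem.Str.splitMax? s ":" 1).getD []) 1 "")

-- A's loop body; state = (mappings, node_index)
def pvStepA (st : List String × Int) (line : String) : List String × Int :=
  let stripped := PySem.Str.lstrip line
  if PySem.Str.startswith stripped "- NodeType:" then
    (st.1 ++ [""], st.2 + 1)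
  else if PySem.Str.startswith stripped "ImageIndexLocal2Global:" then
    let value := pvVal stripped
    if 0 ≤ st.2 ∧ st.2 < (st.1.length : Int) then (st.1.set st.2.toNat value, st.2)
    else st
  else st

def extract_node_mappings_py (raw_text : String) : List String :=
  ((PySem.Str.splitlines raw_text).foldl pvStepA ([], -1)).1

-- ===== PORT B =====
def pvLastValue (body : List String) : String :=
  body.foldl
    (fun value s =>
      if PySem.Str.startswith s "ImageIndexLocal2Global:" then pvVal s else value) ""

-- B's sectioning loop body; 'current is not None' holds exactly when at least one section has
-- been opened, and current aliases the last section, so appending to current = appending to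
-- the last element of sections.
def pvStepB (secs : List (List String)) (line : String) : List (List String) :=
  let s := PySem.Str.lstrip line
  if PySem.Str.startswith s "- NodeType:" then secs ++ [[]]
  else
    match secs.getLast? with
    | none => secs
    | some body => secs.dropLast ++ [body ++ [s]]

def extract_node_mappings_py_alt (raw_text : String) : List String :=
  (((PySem.Str.splitlines raw_text).foldl pvStepB []).map pvLastValue)

-- ===== PRECONDITION & SPEC =====
def Spec_extract_node_mappings_py (raw_text : String) (out : List String) : Prop := out = extract_node_mappings_py_alt raw_text
instance (raw_text : String) (out : List String) : Decidable (Spec_extract_node_mappings_py raw_text out) := by unfold Spec_extract_node_mappings_py; infer_instance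

-- ===== CLAIM (what is proved, stated in full; the proofs are below) =====
def Claim_equal_extract_node_mappings_py : Prop := ∀ (raw_text : String), Dom_extract_node_mappings_py raw_text → Spec_extract_node_mappings_py raw_text (extract_node_mappings_py raw_text)

-- ===== LEMMAS AND PROOFS =====

theorem pvLastValue_concat (b : List String) (s : String) :
    pvLastValue (b ++ [s]) =
      if PySem.Str.startswith s "ImageIndexLocal2Global:" then pvVal s else pvLastValue b := by
  simp only [pvLastValue, List.foldl_append, List.foldl_cons, List.foldl_nil]

theorem pv_set_concat {α : Type} (xs : List α) (y v : α) :
    (xs ++ [y]).set xs.length v = xs ++ [v] := by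
  induction xs with
  | nil => rfl
  | cons a as ih => simp [ih]

-- one loop step preserves: A's state = (B's sections mapped through pvLastValue, length - 1)
theorem pv_step (secs : List (List String)) (line : String) :
    pvStepA (secs.map pvLastValue, (secs.length : Int) - 1) line
      = ((pvStepB secs line).map pvLastValue, ((pvStepB secs line).length : Int) - 1) := by
  simp only [pvStepA, pvStepB]
  by_cases hNT : PySem.Str.startswith (PySem.Str.lstrip line) "- NodeType:" = true
  · rw [if_pos hNT, if_pos hNT]
    have h0 : pvLastValue [] = "" := rfl
    simp [h0]
  · rw [if_neg hNT, if_neg hNT]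
    by_cases hII : PySem.Str.startswith (PySem.Str.lstrip line) "ImageIndexLocal2Global:" = true
    · rw [if_pos hII]
      rcases List.eq_nil_or_concat secs with rfl | ⟨L, b, rfl⟩
      · simp
      · simp only [List.concat_eq_append, List.getLast?_concat, List.dropLast_concat]
        have hguard : 0 ≤ ((L ++ [b]).length : Int) - 1 ∧
            ((L ++ [b]).length : Int) - 1 < (((L ++ [b]).map pvLastValue).length : Int) := by
          simp
        rw [if_pos hguard]
        have hidx : (((L ++ [b]).length : Int) - 1).toNat = L.length := by simp
        rw [hidx]
        have hset : ((L ++ [b]).map pvLastValue).set L.length (pvVal (PySem.Str.lstrip line))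
            = L.map pvLastValue ++ [pvVal (PySem.Str.lstrip line)] := by
          have hl : L.length = (L.map pvLastValue).length := (List.length_map (f := pvLastValue) (as := L)).symm
          rw [List.map_append, hl]
          exact pv_set_concat (L.map pvLastValue) (pvLastValue b) (pvVal (PySem.Str.lstrip line))
        rw [hset]
        have hmap : (L ++ [b ++ [PySem.Str.lstrip line]]).map pvLastValue
            = L.map pvLastValue ++ [pvVal (PySem.Str.lstrip line)] := by
          rw [List.map_append, List.map_cons, List.map_nil, pvLastValue_concat, if_pos hII]
        rw [hmap]
        simp
    · rw [if_neg hII]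
      rcases List.eq_nil_or_concat secs with rfl | ⟨L, b, rfl⟩
      · simp
      · simp only [List.concat_eq_append, List.getLast?_concat, List.dropLast_concat]
        have hmap : (L ++ [b ++ [PySem.Str.lstrip line]]).map pvLastValue
            = L.map pvLastValue ++ [pvLastValue b] := by
          rw [List.map_append, List.map_cons, List.map_nil, pvLastValue_concat, if_neg hII]
        rw [hmap]
        simp

theorem pv_main (lines : List String) (secs : List (List String)) :
    lines.foldl pvStepA (secs.map pvLastValue, (secs.length : Int) - 1)
      = ((lines.foldl pvStepB secs).map pvLastValue,
         ((lines.foldl pvStepB secs).length : Int) - 1) := by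
  induction lines generalizing secs with
  | nil => rfl
  | cons line rest ih =>
    rw [List.foldl_cons, List.foldl_cons, pv_step]
    exact ih (pvStepB secs line)

-- ===== VERDICT (by name: the statement is the Claim_ definition above) =====
theorem extract_node_mappings_py_spec : Claim_equal_extract_node_mappings_py := by
  intro raw_text _
  unfold Spec_extract_node_mappings_py extract_node_mappings_py extract_node_mappings_py_alt
  have h := pv_main (PySem.Str.splitlines raw_text) []
  simpa using congrArg Prod.fst h
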